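-- pv_equiv track=rewrite | github.com/albertddong/accessibility | backend/services/tables.py | normalize_table_data
-- ===== SOURCE A (Python) =====
-- from typing import Any
--
-- def normalize_table_data(table_data: list[list[Any]] | None) -> list[list[Any]] | None:
--     """Pad rows to rectangular shape and fill empty cells from merged-like patterns."""
--     if not table_data:
--         return table_data
--
--     max_cols = max(len(row) for row in table_data)
--     normalized: list[list[Any]] = []
--     for row in table_data:
--         padded = list(row) + [""] * (max_cols - len(row))
--         normalized.append(padded)
--
--     def is_empty(value: Any) -> bool:
--         return value is None or str(value).strip() == ""
--
--     for row_index in range(len(normalized)):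
--         last_value = None
--         for col_index in range(max_cols):
--             if not is_empty(normalized[row_index][col_index]):
--                 last_value = normalized[row_index][col_index]
--             elif last_value is not None:
--                 normalized[row_index][col_index] = last_value
--
--     for col_index in range(max_cols):
--         last_value = None
--         for row_index in range(len(normalized)):
--             if not is_empty(normalized[row_index][col_index]):
--                 last_value = normalized[row_index][col_index]
--             elif last_value is not None:
--                 normalized[row_index][col_index] = last_value
--
--     return normalized
-- ===== SOURCE B (Python) =====
-- def normalize_table_data(table_data):
--     """Pad rows rectangular; single top-to-bottom pass doing row fill and column fill together."""
--     if not table_data: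
--         return table_data
--
--     max_cols = max(len(row) for row in table_data)
--
--     def is_empty(value):
--         return value is None or str(value).strip() == ""
--
--     out = []
--     col_last = [None] * max_cols
--     for row in table_data:
--         padded = list(row) + [""] * (max_cols - len(row))
--         # row forward-fill
--         q = []
--         row_last = None
--         for x in padded:
--             if not is_empty(x):
--                 row_last = x
--                 q.append(x)
--             else:
--                 q.append(x if row_last is None else row_last)
--         # column forward-fill driven by the row-filled values
--         out.append([x if not is_empty(x) else (x if l is None else l)
--                     for l, x in zip(col_last, q)])
--         col_last = [x if not is_empty(x) else l for l, x in zip(col_last, q)]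
--     return out
-- ===== Notes on version B (the rewrite author's own statement) =====
-- stated objective: alternative
-- what changed: B fuses A's two separate in-place index-loop passes (row forward-fill over the whole matrix, then a column-major forward-fill pass) into a single top-to-bottom traversal that pads, row-fills and column-fills each row as it is built, carrying one col_last vector instead of mutating the matrix.
import Mathlib
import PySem

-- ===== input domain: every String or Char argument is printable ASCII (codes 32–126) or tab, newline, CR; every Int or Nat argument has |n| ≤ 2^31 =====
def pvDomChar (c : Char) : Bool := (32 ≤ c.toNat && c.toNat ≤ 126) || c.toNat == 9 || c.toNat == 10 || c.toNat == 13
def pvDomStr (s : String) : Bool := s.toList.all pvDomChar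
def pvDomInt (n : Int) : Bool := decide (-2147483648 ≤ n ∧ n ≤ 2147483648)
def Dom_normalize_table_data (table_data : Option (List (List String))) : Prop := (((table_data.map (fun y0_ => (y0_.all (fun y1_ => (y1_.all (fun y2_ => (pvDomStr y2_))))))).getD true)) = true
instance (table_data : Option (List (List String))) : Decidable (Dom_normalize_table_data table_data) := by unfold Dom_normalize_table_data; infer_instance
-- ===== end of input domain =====

-- B fuses A's two separate in-place index-loop fill passes into ONE top-to-bottom traversal
-- that pads, row-fills and column-fills each row as it is built, carrying a col_last vector. (objective: alternative)

-- ===== PORT A =====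
-- is_empty(value): values are strings here, so `value is None` is False and str(value) = value
def isEmptyCell (v : String) : Bool := PySem.Str.strip v == ""

-- body of both inner loops of A: reads normalized[r][c]; indices produced by range() are in range
def aCellStep (r c : Nat) (s : List (List String) × Option String) : List (List String) × Option String :=
  let v := (s.1.getD r []).getD c ""
  if ¬ isEmptyCell v then (s.1, some v)
  else match s.2 with
    | some lv => (s.1.set r ((s.1.getD r []).set c lv), s.2)
    | none => s

-- first pass: for row_index in range(len(normalized)): last_value = None; for col_index in range(max_cols): …
def aRowPass (w : Nat) (m : List (List String)) : List (List String) :=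
  (List.range m.length).foldl
    (fun m r => ((List.range w).foldl (fun s c => aCellStep r c s) (m, none)).1) m

-- second pass: for col_index in range(max_cols): last_value = None; for row_index in range(len(normalized)): …
def aColPass (w : Nat) (m : List (List String)) : List (List String) :=
  (List.range w).foldl
    (fun m c => ((List.range m.length).foldl (fun s r => aCellStep r c s) (m, none)).1) m

def normalize_table_data (table_data : Option (List (List String))) : Option (List (List String)) :=
  match table_data with
  | none => none
  | some rows =>
    if rows.isEmpty then some rows
    else
      -- max(len(row) for row in table_data): rows nonempty here, so max? is some
      let max_cols : Nat := (PySem.List.max? (rows.map (fun r => r.length)) (fun x => x)).getD 0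
      let normalized : List (List String) :=
        rows.foldl (fun acc row => acc ++ [row ++ List.replicate (max_cols - row.length) ""]) []
      some (aColPass max_cols (aRowPass max_cols normalized))

-- ===== PORT B =====
-- B's row forward-fill loop: q built left to right carrying row_last
def rowFill (l : Option String) : List String → List String
  | [] => []
  | x :: xs =>
    if ¬ isEmptyCell x then x :: rowFill (some x) xs
    else (match l with | none => x | some v => v) :: rowFill l xs

-- [x if not is_empty(x) else (x if l is None else l) for l, x in zip(col_last, q)]
def outRowB (cl : List (Option String)) (q : List String) : List String :=
  List.zipWith (fun l x => if ¬ isEmptyCell x then x else (match l with | none => x | some v => v)) cl q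

-- col_last = [x if not is_empty(x) else l for l, x in zip(col_last, q)]
def stepClB (cl : List (Option String)) (q : List String) : List (Option String) :=
  List.zipWith (fun l x => if ¬ isEmptyCell x then some x else l) cl q

def normalize_table_data_alt (table_data : Option (List (List String))) : Option (List (List String)) :=
  match table_data with
  | none => none
  | some rows =>
    if rows.isEmpty then some rows
    else
      let max_cols : Nat := (PySem.List.max? (rows.map (fun r => r.length)) (fun x => x)).getD 0
      some ((rows.foldl
        (fun (s : List (Option String) × List (List String)) row =>
          let q := rowFill none (row ++ List.replicate (max_cols - row.length) "")
          (stepClB s.1 q, s.2 ++ [outRowB s.1 q]))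
        (List.replicate max_cols none, [])).2)

-- ===== PRECONDITION & SPEC =====
def Spec_normalize_table_data (table_data : Option (List (List String))) (out : Option (List (List String))) : Prop := out = normalize_table_data_alt table_data
instance (table_data : Option (List (List String))) (out : Option (List (List String))) : Decidable (Spec_normalize_table_data table_data out) := by unfold Spec_normalize_table_data; infer_instance

-- ===== CLAIM (what is proved, stated in full; the proofs are below) =====
def Claim_equal_normalize_table_data : Prop := ∀ (table_data : Option (List (List String))), Dom_normalize_table_data table_data → Spec_normalize_table_data table_data (normalize_table_data table_data)

-- ===== LEMMAS AND PROOFS =====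

-- running last-nonempty state of a 1-D forward fill
def lastSt (l : Option String) (xs : List String) : Option String :=
  xs.foldl (fun l x => if ¬ isEmptyCell x then some x else l) l

-- A's column-inner loop, expressed structurally on the list of rows
def colApply (c : Nat) (l : Option String) : List (List String) → List (List String)
  | [] => []
  | row :: rest =>
    let v := row.getD c ""
    if ¬ isEmptyCell v then row :: colApply c (some v) rest
    else match l with
      | some lv => row.set c lv :: colApply c l rest
      | none => row :: colApply c l rest

-- B's vertical-fill recursion on already row-filled rows
def vfill (cl : List (Option String)) : List (List String) → List (List String)
  | [] => []
  | q :: rest => outRowB cl q :: vfill (stepClB cl q) rest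

def colOf (c : Nat) (m : List (List String)) : List String := m.map (fun row => row.getD c "")

theorem rowFill_length (l : Option String) (xs : List String) : (rowFill l xs).length = xs.length := by
  induction xs generalizing l with
  | nil => rfl
  | cons x xs ih => unfold rowFill; split_ifs <;> simp [ih]

theorem le_max?_getD (xs : List Nat) (x : Nat) (hx : x ∈ xs) :
    x ≤ (PySem.List.max? xs (fun y => y)).getD 0 := by
  cases xs with
  | nil => cases hx
  | cons a t =>
    rw [PySem.List.max?_id_cons]
    rcases List.mem_cons.mp hx with rfl | h
    · exact (PySem.List.le_foldl_max t x).1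
    · exact (PySem.List.le_foldl_max t a).2 x h

theorem rowFill_cons (l : Option String) (x : String) (xs : List String) :
    rowFill l (x :: xs) = if ¬ isEmptyCell x then x :: rowFill (some x) xs
      else (match l with | none => x | some v => v) :: rowFill l xs := rfl

theorem lastSt_cons (l : Option String) (x : String) (xs : List String) :
    lastSt l (x :: xs) = lastSt (if ¬ isEmptyCell x then some x else l) xs := rfl

-- ROW PASS: inner fold over columns on the matrix = same fold on the single row r
def rowListStep (s : List String × Option String) (c : Nat) : List String × Option String :=
  let v := s.1.getD c ""
  if ¬ isEmptyCell v then (s.1, some v)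
  else match s.2 with
    | some lv => (s.1.set c lv, s.2)
    | none => s

theorem rowInner_set (cs : List Nat) (m : List (List String)) (r : Nat) (row : List String)
    (l : Option String) (hr : r < m.length) :
    cs.foldl (fun s c => aCellStep r c s) (m.set r row, l)
      = ((m.set r (cs.foldl rowListStep (row, l)).1), (cs.foldl rowListStep (row, l)).2) := by
  induction cs generalizing row l with
  | nil => rfl
  | cons c cs ih =>
    have hrow : (m.set r row)[r]?.getD [] = row := by
      rw [← List.getD_eq_getElem?_getD, List.getD_eq_getElem _ _ (by simpa using hr),
        List.getElem_set_self]
    simp only [List.foldl_cons]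
    by_cases hv : isEmptyCell (row[c]?.getD "")
    · cases l with
      | none =>
        have h1 : aCellStep r c (m.set r row, none) = (m.set r row, none) := by
          simp [aCellStep, hrow, hv]
        have h2 : rowListStep (row, none) c = (row, none) := by
          simp [rowListStep, hv]
        rw [h1, h2, ih row none]
      | some lv =>
        have h1 : aCellStep r c (m.set r row, some lv) = (m.set r (row.set c lv), some lv) := by
          simp [aCellStep, hrow, hv, List.set_set]
        have h2 : rowListStep (row, some lv) c = (row.set c lv, some lv) := by
          simp [rowListStep, hv]
        rw [h1, h2, ih (row.set c lv) (some lv)]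
    · have h1 : aCellStep r c (m.set r row, l) = (m.set r row, some (row[c]?.getD "")) := by
        simp [aCellStep, hrow, hv]
      have h2 : rowListStep (row, l) c = (row, some (row[c]?.getD "")) := by
        simp [rowListStep, hv]
      rw [h1, h2, ih row (some (row[c]?.getD ""))]

theorem rowList_fill : ∀ (n k : Nat) (row : List String) (l : Option String), k + n = row.length →
    (List.range' k n).foldl rowListStep (row, l)
      = (row.take k ++ rowFill l (row.drop k), lastSt l (row.drop k)) := by
  intro n
  induction n with
  | zero =>
    intro k row l h
    simp at h
    simp [List.take_of_length_le (le_of_eq h.symm), List.drop_of_length_le (le_of_eq h.symm),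
      rowFill, lastSt]
  | succ n ih =>
    intro k row l h
    have hk : k < row.length := by omega
    have hdrop : row.drop k = row[k] :: row.drop (k + 1) := List.drop_eq_getElem_cons hk
    have hget : row[k]?.getD "" = row[k] := by
      rw [← List.getD_eq_getElem?_getD]; exact List.getD_eq_getElem _ _ hk
    have htake : row.take (k + 1) = row.take k ++ [row[k]] := by
      rw [← List.take_concat_get hk, List.concat_eq_append]
    rw [List.range'_succ, List.foldl_cons]
    by_cases hv : isEmptyCell row[k]
    · cases l with
      | none =>
        have h1 : rowListStep (row, none) k = (row, none) := by
          simp [rowListStep, hget, hv]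
        rw [h1, ih (k + 1) row none (by omega), hdrop, rowFill_cons, lastSt_cons]
        simp only [hv, not_true_eq_false, if_false]
        rw [htake, List.append_assoc, List.singleton_append]
      | some lv =>
        have h1 : rowListStep (row, some lv) k = (row.set k lv, some lv) := by
          simp [rowListStep, hget, hv]
        have e1 : (row.set k lv).take (k + 1) = row.take k ++ [lv] := by
          rw [List.take_set, htake,
            List.set_append_right _ _ (by rw [List.length_take_of_le (le_of_lt hk)])]
          simp [List.length_take_of_le (le_of_lt hk)]
        have e2 : (row.set k lv).drop (k + 1) = row.drop (k + 1) := by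
          rw [List.drop_set, if_pos (by omega)]
        rw [h1, ih (k + 1) (row.set k lv) (some lv) (by simp; omega), e1, e2, hdrop,
          rowFill_cons, lastSt_cons]
        simp [hv]
    · have h1 : rowListStep (row, l) k = (row, some row[k]) := by
        simp [rowListStep, hget, hv]
      rw [h1, ih (k + 1) row (some row[k]) (by omega), hdrop, rowFill_cons, lastSt_cons]
      rw [htake, List.append_assoc, List.singleton_append]
      simp [hv]

theorem aRowPass_fold (w : Nat) : ∀ (n k : Nat) (m : List (List String)), k + n = m.length →
    (∀ i, i < m.length → (m.getD i []).length = w) →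
    (List.range' k n).foldl
      (fun m r => ((List.range w).foldl (fun s c => aCellStep r c s) (m, none)).1) m
      = m.take k ++ (m.drop k).map (fun row => rowFill none row) := by
  intro n
  induction n with
  | zero =>
    intro k m h _
    simp at h
    simp [List.take_of_length_le (le_of_eq h.symm), List.drop_of_length_le (le_of_eq h.symm)]
  | succ n ih =>
    intro k m h hlen
    have hk : k < m.length := by omega
    have hget : m.getD k [] = m[k] := List.getD_eq_getElem _ _ hk
    have hset : m.set k m[k] = m := List.set_getElem_self hk
    have hw : m[k].length = w := by rw [← hget]; exact hlen k hk
    rw [List.range'_succ, List.foldl_cons]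
    have step1 : ((List.range w).foldl (fun s c => aCellStep k c s) (m, none)).1
        = m.set k (rowFill none m[k]) := by
      conv_lhs => rw [← hset]
      rw [rowInner_set (List.range w) m k m[k] none hk, List.range_eq_range',
        rowList_fill w 0 m[k] none (by omega)]
      simp
    rw [step1]
    have hlen' : ∀ i, i < (m.set k (rowFill none m[k])).length →
        ((m.set k (rowFill none m[k])).getD i []).length = w := by
      intro i hi
      simp only [List.length_set] at hi
      by_cases hik : i = k
      · subst hik
        rw [List.getD_eq_getElem _ _ (by simpa using hi), List.getElem_set_self, rowFill_length]
        exact hw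
      · rw [List.getD_eq_getElem?_getD, List.getElem?_set_ne (Ne.symm hik),
          ← List.getD_eq_getElem?_getD]
        exact hlen i hi
    rw [ih (k + 1) _ (by simp; omega) hlen']
    have e1 : (m.set k (rowFill none m[k])).take (k + 1) = m.take k ++ [rowFill none m[k]] := by
      rw [List.take_set, ← List.take_concat_get hk, List.concat_eq_append,
        List.set_append_right _ _ (by rw [List.length_take_of_le (le_of_lt hk)]),
        List.length_take_of_le (le_of_lt hk)]
      simp
    have e2 : (m.set k (rowFill none m[k])).drop (k + 1) = m.drop (k + 1) := by
      rw [List.drop_set, if_pos (by omega)]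
    rw [e1, e2, List.drop_eq_getElem_cons hk, List.map_cons, List.append_assoc,
      List.singleton_append]

theorem aRowPass_map (w : Nat) (m : List (List String))
    (hshape : ∀ i, i < m.length → (m.getD i []).length = w) :
    aRowPass w m = m.map (fun row => rowFill none row) := by
  unfold aRowPass
  have h := aRowPass_fold w m.length 0 m (by simp) hshape
  rw [List.range_eq_range'] at h
  rw [List.range_eq_range', List.range_eq_range', h]
  simp

-- COL PASS
theorem colApply_cons (c : Nat) (l : Option String) (row : List String)
    (rest : List (List String)) :
    colApply c l (row :: rest)
      = if ¬ isEmptyCell (row.getD c "") then row :: colApply c (some (row.getD c "")) rest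
        else match l with
          | some lv => row.set c lv :: colApply c l rest
          | none => row :: colApply c l rest := rfl

theorem colOf_cons (c : Nat) (row : List String) (rest : List (List String)) :
    colOf c (row :: rest) = row.getD c "" :: colOf c rest := rfl

theorem colInner_colApply (c : Nat) : ∀ (n k : Nat) (m : List (List String)) (l : Option String),
    k + n = m.length →
    (List.range' k n).foldl (fun s r => aCellStep r c s) (m, l)
      = (m.take k ++ colApply c l (m.drop k), lastSt l (colOf c (m.drop k))) := by
  intro n
  induction n with
  | zero =>
    intro k m l h
    simp at h
    simp [List.take_of_length_le (le_of_eq h.symm), List.drop_of_length_le (le_of_eq h.symm),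
      colApply, colOf, lastSt]
  | succ n ih =>
    intro k m l h
    have hk : k < m.length := by omega
    have hgetm : m[k]?.getD [] = m[k] := by
      rw [← List.getD_eq_getElem?_getD]; exact List.getD_eq_getElem _ _ hk
    have hgetc : m[k].getD c "" = m[k][c]?.getD "" := List.getD_eq_getElem?_getD
    have hdrop : m.drop k = m[k] :: m.drop (k + 1) := List.drop_eq_getElem_cons hk
    have htake : m.take (k + 1) = m.take k ++ [m[k]] := by
      rw [← List.take_concat_get hk, List.concat_eq_append]
    rw [List.range'_succ, List.foldl_cons]
    by_cases hv : isEmptyCell (m[k][c]?.getD "")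
    · cases l with
      | none =>
        have h1 : aCellStep k c (m, none) = (m, none) := by
          simp [aCellStep, hgetm, hv]
        rw [h1, ih (k + 1) m none (by omega), hdrop, colApply_cons, colOf_cons, lastSt_cons]
        rw [hgetc]
        simp only [hv, not_true_eq_false, if_false]
        rw [htake, List.append_assoc, List.singleton_append]
      | some lv =>
        have h1 : aCellStep k c (m, some lv) = (m.set k (m[k].set c lv), some lv) := by
          simp [aCellStep, hgetm, hv]
        have e1 : (m.set k (m[k].set c lv)).take (k + 1) = m.take k ++ [m[k].set c lv] := by
          rw [List.take_set, htake,
            List.set_append_right _ _ (by rw [List.length_take_of_le (le_of_lt hk)]),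
            List.length_take_of_le (le_of_lt hk)]
          simp
        have e2 : (m.set k (m[k].set c lv)).drop (k + 1) = m.drop (k + 1) := by
          rw [List.drop_set, if_pos (by omega)]
        rw [h1, ih (k + 1) _ (some lv) (by simp; omega), e1, e2, hdrop, colApply_cons,
          colOf_cons, lastSt_cons]
        rw [hgetc]
        simp only [hv, not_true_eq_false, if_false]
        rw [List.append_assoc, List.singleton_append]
    · have h1 : aCellStep k c (m, l) = (m, some (m[k][c]?.getD "")) := by
        simp [aCellStep, hgetm, hv]
      rw [h1, ih (k + 1) m _ (by omega), hdrop, colApply_cons, colOf_cons, lastSt_cons]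
      rw [hgetc]
      rw [htake, List.append_assoc, List.singleton_append]
      simp [hv]

theorem colApply_length (c : Nat) (l : Option String) (m : List (List String)) :
    (colApply c l m).length = m.length := by
  induction m generalizing l with
  | nil => rfl
  | cons row rest ih =>
    rw [colApply_cons]
    split_ifs <;> cases l <;> simp [ih]

theorem colApply_rows (w c : Nat) (l : Option String) (m : List (List String))
    (h : ∀ row ∈ m, row.length = w) : ∀ row ∈ colApply c l m, row.length = w := by
  induction m generalizing l with
  | nil => intro r hr; cases hr
  | cons row rest ih =>
    have hrw := h row (by simp)
    have hrest : ∀ r ∈ rest, r.length = w := fun r hr => h r (by simp [hr])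
    intro r hr
    by_cases hv : isEmptyCell (row.getD c "")
    all_goals rw [List.getD_eq_getElem?_getD] at hv
    · cases l with
      | none =>
        have e : colApply c none (row :: rest) = row :: colApply c none rest := by
          rw [colApply_cons]; simp [hv]
        rw [e] at hr
        rcases List.mem_cons.mp hr with rfl | hr
        · exact hrw
        · exact ih none hrest r hr
      | some lv =>
        have e : colApply c (some lv) (row :: rest)
            = row.set c lv :: colApply c (some lv) rest := by
          rw [colApply_cons]; simp [hv]
        rw [e] at hr
        rcases List.mem_cons.mp hr with rfl | hr
        · simp [hrw]
        · exact ih (some lv) hrest r hr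
    · have e : colApply c l (row :: rest)
          = row :: colApply c (some (row.getD c "")) rest := by
        rw [colApply_cons]; simp [hv]
      rw [e] at hr
      rcases List.mem_cons.mp hr with rfl | hr
      · exact hrw
      · exact ih (some (row.getD c "")) hrest r hr

theorem colOf_colApply_self (c : Nat) (l : Option String) (m : List (List String))
    (hc : ∀ row ∈ m, c < row.length) :
    colOf c (colApply c l m) = rowFill l (colOf c m) := by
  induction m generalizing l with
  | nil => rfl
  | cons row rest ih =>
    have hcr : c < row.length := hc row (by simp)
    have hrest : ∀ r ∈ rest, c < r.length := fun r hr => hc r (by simp [hr])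
    by_cases hv : isEmptyCell (row.getD c "")
    all_goals rw [List.getD_eq_getElem?_getD] at hv
    · cases l with
      | none =>
        have e : colApply c none (row :: rest) = row :: colApply c none rest := by
          rw [colApply_cons]; simp [hv]
        rw [e, colOf_cons, colOf_cons, rowFill_cons, ih none hrest]
        simp [hv]
      | some lv =>
        have e : colApply c (some lv) (row :: rest)
            = row.set c lv :: colApply c (some lv) rest := by
          rw [colApply_cons]; simp [hv]
        have hset : (row.set c lv).getD c "" = lv := by
          rw [List.getD_eq_getElem _ _ (by simpa using hcr), List.getElem_set_self]
        rw [e, colOf_cons, colOf_cons, rowFill_cons, ih (some lv) hrest, hset]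
        simp [hv]
    · have e : colApply c l (row :: rest)
          = row :: colApply c (some (row.getD c "")) rest := by
        rw [colApply_cons]; simp [hv]
      rw [e, colOf_cons, colOf_cons, rowFill_cons, ih (some (row.getD c "")) hrest]
      simp [hv]

theorem colOf_colApply_ne (c c' : Nat) (l : Option String) (m : List (List String))
    (h : c' ≠ c) :
    colOf c' (colApply c l m) = colOf c' m := by
  induction m generalizing l with
  | nil => rfl
  | cons row rest ih =>
    have hset : ∀ lv : String, (row.set c lv).getD c' "" = row.getD c' "" := by
      intro lv
      rw [List.getD_eq_getElem?_getD, List.getD_eq_getElem?_getD,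
        List.getElem?_set_ne (Ne.symm h)]
    by_cases hv : isEmptyCell (row.getD c "")
    all_goals rw [List.getD_eq_getElem?_getD] at hv
    · cases l with
      | none =>
        have e : colApply c none (row :: rest) = row :: colApply c none rest := by
          rw [colApply_cons]; simp [hv]
        rw [e, colOf_cons, colOf_cons, ih none]
      | some lv =>
        have e : colApply c (some lv) (row :: rest)
            = row.set c lv :: colApply c (some lv) rest := by
          rw [colApply_cons]; simp [hv]
        rw [e, colOf_cons, colOf_cons, ih (some lv), hset]
    · have e : colApply c l (row :: rest)
          = row :: colApply c (some (row.getD c "")) rest := by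
        rw [colApply_cons]; simp [hv]
      rw [e, colOf_cons, colOf_cons, ih (some (row.getD c ""))]

theorem vfill_cons (cl : List (Option String)) (q : List String) (rest : List (List String)) :
    vfill cl (q :: rest) = outRowB cl q :: vfill (stepClB cl q) rest := rfl

theorem vfill_length (cl : List (Option String)) (m : List (List String)) :
    (vfill cl m).length = m.length := by
  induction m generalizing cl with
  | nil => rfl
  | cons q rest ih => rw [vfill_cons]; simp [ih]

theorem stepClB_length (cl : List (Option String)) (q : List String) :
    (stepClB cl q).length = min cl.length q.length := by
  simp [stepClB]

theorem vfill_rows (w : Nat) (cl : List (Option String)) (m : List (List String))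
    (hcl : cl.length = w) (hm : ∀ row ∈ m, row.length = w) :
    ∀ row ∈ vfill cl m, row.length = w := by
  induction m generalizing cl with
  | nil => intro r hr; cases hr
  | cons q rest ih =>
    rw [vfill_cons]
    intro r hr
    rcases List.mem_cons.mp hr with rfl | hr
    · simp [outRowB, hcl, hm q (by simp)]
    · exact ih (stepClB cl q) (by simp [stepClB_length, hcl, hm q (by simp)])
        (fun r hr => hm r (by simp [hr])) r hr

theorem colOf_vfill (c w : Nat) : ∀ (m : List (List String)) (cl : List (Option String)),
    c < w → cl.length = w → (∀ row ∈ m, row.length = w) →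
    colOf c (vfill cl m) = rowFill (cl.getD c none) (colOf c m) := by
  intro m
  induction m with
  | nil => intro cl _ _ _; rfl
  | cons q rest ih =>
    intro cl hc hcl hm
    have hq : q.length = w := hm q (by simp)
    have hcq : c < q.length := by omega
    have hccl : c < cl.length := by omega
    rw [vfill_cons, colOf_cons, colOf_cons, rowFill_cons]
    have hout : (outRowB cl q).getD c ""
        = if ¬ isEmptyCell (q.getD c "") then q.getD c ""
          else (match cl.getD c none with | none => q.getD c "" | some v => v) := by
      rw [List.getD_eq_getElem _ _ (by simp [outRowB]; omega)]
      simp only [outRowB, List.getElem_zipWith]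
      rw [List.getD_eq_getElem _ _ hcq, List.getD_eq_getElem _ _ hccl]
    have hstep : (stepClB cl q).getD c none
        = if ¬ isEmptyCell (q.getD c "") then some (q.getD c "") else cl.getD c none := by
      rw [List.getD_eq_getElem _ _ (by simp [stepClB]; omega)]
      simp only [stepClB, List.getElem_zipWith]
      rw [List.getD_eq_getElem _ _ hcq, List.getD_eq_getElem _ _ hccl]
    have htail := ih (stepClB cl q) hc (by simp [stepClB_length, hcl, hq])
      (fun r hr => hm r (by simp [hr]))
    by_cases hv : isEmptyCell (q.getD c "")
    all_goals rw [List.getD_eq_getElem?_getD] at hv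
    · rw [hout, htail, hstep]
      simp [hv]
    · rw [hout, htail, hstep]
      simp [hv]

theorem matrix_ext (w : Nat) (m₁ m₂ : List (List String))
    (hlen : m₁.length = m₂.length)
    (h1 : ∀ row ∈ m₁, row.length = w) (h2 : ∀ row ∈ m₂, row.length = w)
    (hcol : ∀ c, c < w → colOf c m₁ = colOf c m₂) : m₁ = m₂ := by
  apply List.ext_getElem hlen
  intro r hr1 hr2
  apply List.ext_getElem
    (by rw [h1 _ (List.getElem_mem hr1), h2 _ (List.getElem_mem hr2)])
  intro c hc1 hc2
  have hcw : c < w := by rw [h1 _ (List.getElem_mem hr1)] at hc1; exact hc1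
  have h := congrArg (fun l => l[r]?) (hcol c hcw)
  simp only [colOf, List.getElem?_map] at h
  rw [List.getElem?_eq_getElem hr1, List.getElem?_eq_getElem hr2] at h
  simp only [Option.map_some] at h
  have h' := Option.some.inj h
  rwa [List.getD_eq_getElem _ _ hc1, List.getD_eq_getElem _ _ hc2] at h'

theorem foldCols (w : Nat) : ∀ (cs : List Nat) (m : List (List String)), cs.Nodup →
    (∀ c' ∈ cs, c' < w) → (∀ row ∈ m, row.length = w) →
    ((∀ row ∈ cs.foldl (fun m c => colApply c none m) m, row.length = w) ∧
     (cs.foldl (fun m c => colApply c none m) m).length = m.length ∧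
     ∀ c, c < w → colOf c (cs.foldl (fun m c => colApply c none m) m)
        = if c ∈ cs then rowFill none (colOf c m) else colOf c m) := by
  intro cs
  induction cs with
  | nil => intro m _ _ hm; exact ⟨hm, rfl, fun c _ => by simp⟩
  | cons c0 cs ih =>
    intro m hnd hlt hm
    have hc0w : c0 < w := hlt c0 (by simp)
    have hm' : ∀ row ∈ colApply c0 none m, row.length = w := colApply_rows w c0 none m hm
    have hnd' : cs.Nodup := (List.nodup_cons.mp hnd).2
    have hc0 : c0 ∉ cs := (List.nodup_cons.mp hnd).1
    obtain ⟨ha, hb, hc⟩ := ih (colApply c0 none m) hnd'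
      (fun c hcm => hlt c (by simp [hcm])) hm'
    rw [List.foldl_cons]
    refine ⟨ha, by rw [hb, colApply_length], ?_⟩
    intro c hcw
    by_cases hcc : c = c0
    · subst hcc
      rw [hc c hcw, if_neg hc0, if_pos (by simp),
        colOf_colApply_self c none m (fun row hr => by rw [hm row hr]; exact hcw)]
    · rw [hc c hcw, colOf_colApply_ne c0 c none m hcc]
      by_cases hmem : c ∈ cs
      · rw [if_pos hmem, if_pos (by simp [hmem])]
      · rw [if_neg hmem, if_neg (by simp [hcc, hmem])]

theorem aColPass_vfill (w : Nat) (m : List (List String))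
    (hm : ∀ row ∈ m, row.length = w) :
    aColPass w m = vfill (List.replicate w none) m := by
  have key : aColPass w m = (List.range w).foldl (fun m c => colApply c none m) m := by
    have hfun : (fun (m : List (List String)) (c : Nat) =>
        ((List.range m.length).foldl (fun s r => aCellStep r c s) (m, none)).1)
        = fun m c => colApply c none m := by
      funext m c
      rw [List.range_eq_range', colInner_colApply c m.length 0 m none (by simp)]
      simp
    unfold aColPass
    rw [hfun]
  rw [key]
  obtain ⟨ha, hb, hc⟩ := foldCols w (List.range w) m List.nodup_range
    (fun c hcm => List.mem_range.mp hcm) hm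
  apply matrix_ext w _ _ (by rw [hb, vfill_length]) ha
    (vfill_rows w _ m (by simp) hm)
  intro c hcw
  rw [hc c hcw, if_pos (List.mem_range.mpr hcw), colOf_vfill c w m (List.replicate w none)
    hcw (by simp) hm, List.getD_replicate _ hcw]

theorem b_loop (w : Nat) : ∀ (rows : List (List String)) (cl : List (Option String)) (acc : List (List String)),
    (rows.foldl
      (fun (s : List (Option String) × List (List String)) row =>
        let q := rowFill none (row ++ List.replicate (w - row.length) "")
        (stepClB s.1 q, s.2 ++ [outRowB s.1 q])) (cl, acc)).2
    = acc ++ vfill cl (rows.map (fun row => rowFill none (row ++ List.replicate (w - row.length) ""))) := by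
  intro rows
  induction rows with
  | nil => intro cl acc; simp [vfill]
  | cons row rest ih =>
    intro cl acc
    rw [List.foldl_cons, List.map_cons, vfill_cons]
    rw [ih (stepClB cl (rowFill none (row ++ List.replicate (w - row.length) "")))
      (acc ++ [outRowB cl (rowFill none (row ++ List.replicate (w - row.length) ""))])]
    simp

theorem pad_fold_gen (w : Nat) : ∀ (rows : List (List String)) (acc : List (List String)),
    rows.foldl (fun acc row => acc ++ [row ++ List.replicate (w - row.length) ""]) acc
      = acc ++ rows.map (fun row => row ++ List.replicate (w - row.length) "") := by
  intro rows
  induction rows with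
  | nil => intro acc; simp
  | cons r rest ih => intro acc; rw [List.foldl_cons, ih]; simp

theorem pad_fold (w : Nat) (rows : List (List String)) :
    rows.foldl (fun acc row => acc ++ [row ++ List.replicate (w - row.length) ""]) []
      = rows.map (fun row => row ++ List.replicate (w - row.length) "") := by
  simpa using pad_fold_gen w rows []

theorem main_eq (w : Nat) (rows : List (List String))
    (hbound : ∀ row ∈ rows, row.length ≤ w) :
    aColPass w (aRowPass w
      (rows.foldl (fun acc row => acc ++ [row ++ List.replicate (w - row.length) ""]) []))
    = (rows.foldl
        (fun (s : List (Option String) × List (List String)) row =>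
          let q := rowFill none (row ++ List.replicate (w - row.length) "")
          (stepClB s.1 q, s.2 ++ [outRowB s.1 q])) (List.replicate w none, [])).2 := by
  have hpadlen : ∀ row ∈ rows, (row ++ List.replicate (w - row.length) "").length = w := by
    intro row hr
    have := hbound row hr
    simp
    omega
  rw [pad_fold w rows]
  have hNshape : ∀ i, i < (rows.map (fun row => row ++ List.replicate (w - row.length) "")).length →
      (((rows.map (fun row => row ++ List.replicate (w - row.length) "")).getD i []).length = w) := by
    intro i hi
    simp only [List.length_map] at hi
    rw [List.getD_eq_getElem _ _ (by simpa using hi), List.getElem_map]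
    exact hpadlen _ (List.getElem_mem hi)
  rw [aRowPass_map w _ hNshape]
  have hMrows : ∀ row ∈ (rows.map (fun row => row ++ List.replicate (w - row.length) "")).map
      (fun row => rowFill none row), row.length = w := by
    intro r hr
    rcases List.mem_map.mp hr with ⟨p, hp, rfl⟩
    rcases List.mem_map.mp hp with ⟨row, hrow, rfl⟩
    rw [rowFill_length]
    exact hpadlen row hrow
  rw [aColPass_vfill w _ hMrows, b_loop w rows (List.replicate w none) []]
  rw [List.map_map]
  simp only [List.nil_append]
  rfl

-- ===== VERDICT (by name: the statement is the Claim_ definition above) =====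
theorem normalize_table_data_spec : Claim_equal_normalize_table_data := by
  unfold Claim_equal_normalize_table_data
  intro td _
  unfold Spec_normalize_table_data
  cases td with
  | none => rfl
  | some rows =>
    simp only [normalize_table_data, normalize_table_data_alt]
    by_cases he : rows.isEmpty
    · simp [he]
    · rw [if_neg (by simp [he]), if_neg (by simp [he])]
      have key := main_eq ((PySem.List.max? (rows.map (fun r => r.length)) (fun x => x)).getD 0)
        rows (fun row hr => le_max?_getD (rows.map (fun r => r.length)) row.length
          (List.mem_map_of_mem hr))
      exact congrArg some key
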